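-- pv_equiv track=rewrite | github.com/miliar/Code_Jam_Webscraper | Solutions_python/Problem_190/205.py | sort_solution
-- ===== SOURCE A (Python) =====
-- def sort_solution(t, n):
--     if n == 1:
--         return t
--     l = len(t)
--     t1 = sort_solution(t[:l//2], n - 1)
--     t2 = sort_solution(t[l//2:], n - 1)
--     if t1 < t2:
--         return t1 + t2
--     else:
--         return t2 + t1
-- ===== SOURCE B (Python) =====
-- def sort_solution(t, n):
--     # Iterative: an explicit stack lays out the split tree over index ranges,
--     # then a children-first pass combines canonical halves; segments of length
--     # <= 1 are leaves (their canonical form is themselves).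
--     L = len(t)
--     stack = [(0, L, n)]
--     order = []
--     while stack:
--         node = stack.pop()
--         order.append(node)
--         s, e, d = node
--         if d != 1 and e - s > 1:
--             m = s + (e - s) // 2
--             stack.append((s, m, d - 1))
--             stack.append((m, e, d - 1))
--     out = {}
--     for s, e, d in reversed(order):
--         if d == 1 or e - s <= 1:
--             out[(s, e, d)] = t[s:e]
--         else:
--             m = s + (e - s) // 2
--             c1 = out[(s, m, d - 1)]
--             c2 = out[(m, e, d - 1)]
--             out[(s, e, d)] = c1 + c2 if c1 < c2 else c2 + c1
--     return out[(0, L, n)]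
-- ===== Notes on version B (the rewrite author's own statement) =====
-- stated objective: alternative
-- what changed: Replaces the depth-n binary recursion (which descends into every half, including empty and singleton slices, down to depth 1) by an explicit stack that lays out the split tree over index ranges and a children-first combining pass over that worklist, treating segments of length <= 1 as leaves.
-- outside the precondition, e.g. on sort_solution('ab', 0): A raises RecursionError, B returns 'ab'; on sort_solution('ab', 995): A does not finish within the time limit, B returns 'ab'
import Mathlib
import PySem

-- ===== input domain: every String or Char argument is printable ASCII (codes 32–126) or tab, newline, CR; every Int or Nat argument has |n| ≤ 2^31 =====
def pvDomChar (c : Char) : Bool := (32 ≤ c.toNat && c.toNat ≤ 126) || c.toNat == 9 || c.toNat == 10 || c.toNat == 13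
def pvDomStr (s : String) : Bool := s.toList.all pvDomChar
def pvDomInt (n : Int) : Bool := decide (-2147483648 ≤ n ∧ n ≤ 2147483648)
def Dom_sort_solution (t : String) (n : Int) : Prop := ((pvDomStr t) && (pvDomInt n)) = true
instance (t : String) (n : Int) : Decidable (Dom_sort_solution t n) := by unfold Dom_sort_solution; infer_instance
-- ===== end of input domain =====

-- B replaces the depth-n recursion by an explicit stack over index ranges with a
-- children-first combining pass; segments of length ≤ 1 are leaves of the worklist.

-- ===== PORT A =====
-- literal port of A; the recursion depth n is the Nat fuel (n ≥ 1 inside Pre_)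
def sortA : List Char → Nat → List Char
  | t, 0 => t
  | t, 1 => t
  | t, (k+2) =>
    let l : Int := (t.length : Int)
    let t1 := sortA (PySem.List.slice t none (some (PySem.Int.floordiv l 2))) (k+1)
    let t2 := sortA (PySem.List.slice t (some (PySem.Int.floordiv l 2)) none) (k+1)
    if t1 < t2 then t1 ++ t2 else t2 ++ t1

def sort_solution (t : String) (n : Int) : String := String.ofList (sortA t.toList n.toNat)

-- ===== PORT B =====
-- first while-loop of Source B: the stack is a Lean list with its top at the head; the
-- structural fuel 2*|t|+1 bounds the loop's iteration count (the split tree has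
-- nonempty leaves, hence at most 2*|t|+1 nodes; sufficiency is proved below)
def phase1go : Nat → List (Int × Int × Int) → List (Int × Int × Int)
  | 0, _ => []
  | _+1, [] => []
  | fuel+1, (s, e, d) :: rest =>
    if d ≠ 1 ∧ 1 < e - s then
      (s, e, d) ::
        phase1go fuel ((s + PySem.Int.floordiv (e - s) 2, e, d - 1) ::
                (s, s + PySem.Int.floordiv (e - s) 2, d - 1) :: rest)
    else
      (s, e, d) :: phase1go fuel rest

def stepB (t : List Char) (out : PySem.Dict (Int × Int × Int) (List Char))
    (node : Int × Int × Int) : PySem.Dict (Int × Int × Int) (List Char) :=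
  let s := node.1; let e := node.2.1; let d := node.2.2
  if d = 1 ∨ e - s ≤ 1 then
    out.insert node (PySem.List.slice t (some s) (some e))
  else
    let m := s + PySem.Int.floordiv (e - s) 2
    let c1 := (out.get? (s, m, d - 1)).getD []
    let c2 := (out.get? (m, e, d - 1)).getD []
    out.insert node (if c1 < c2 then c1 ++ c2 else c2 ++ c1)

def sort_solution_alt (t : String) (n : Int) : String :=
  let tl := t.toList
  let L : Int := (tl.length : Int)
  let order := phase1go (2 * tl.length + 1) [(0, L, n)]
  let out := order.reverse.foldl (stepB tl) PySem.Dict.empty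
  String.ofList ((out.get? (0, L, n)).getD [])

-- ===== PRECONDITION & SPEC =====
-- A recurses to depth n unconditionally (even on empty slices): for n ≤ 0 the
-- recursion never reaches the base case and A raises RecursionError, and for n at
-- or above CPython's recursion limit (1000, minus the frames already on the stack)
-- A raises RecursionError as well; the upper bound 990 is conservative because the
-- exact raise threshold is interpreter state, and the few excluded n below the
-- threshold are inputs on which A, making 2^(n-1) calls, never actually returns.
def Pre_sort_solution (t : String) (n : Int) : Prop := 1 ≤ n ∧ n ≤ 990
instance (t : String) (n : Int) : Decidable (Pre_sort_solution t n) := by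
  unfold Pre_sort_solution; infer_instance

def pvWitness_sort_solution : String × Int := ("ba", 2)

def Spec_sort_solution (t : String) (n : Int) (out : String) : Prop := out = sort_solution_alt t n
instance (t : String) (n : Int) (out : String) : Decidable (Spec_sort_solution t n out) := by
  unfold Spec_sort_solution; infer_instance

-- ===== CLAIM (what is proved, stated in full; the proofs are below) =====
def Claim_equal_sort_solution : Prop := ∀ (t : String) (n : Int), Dom_sort_solution t n → Pre_sort_solution t n → Spec_sort_solution t n (sort_solution t n)

-- ===== LEMMAS AND PROOFS =====

-- reference function: the canonical form of the segment [s,e) of t at depth d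
def gfun (t : List Char) (s e d : Int) : List Char :=
  if h : d ≠ 1 ∧ 1 < e - s then
    let m := s + PySem.Int.floordiv (e - s) 2
    let c1 := gfun t s m (d - 1)
    let c2 := gfun t m e (d - 1)
    if c1 < c2 then c1 ++ c2 else c2 ++ c1
  else PySem.List.slice t (some s) (some e)
termination_by (e - s).toNat
decreasing_by
  all_goals
    rw [PySem.Int.floordiv_eq_ediv_of_pos (by omega : (0:Int) < 2)]
    omega

def GoodD (t : List Char) (D : PySem.Dict (Int × Int × Int) (List Char)) : Prop :=
  ∀ k v, D.get? k = some v → v = gfun t k.1 k.2.1 k.2.2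

-- proof-side measure: the size of the split tree below a node (bounds the loop's work)
def nodeW (s e d : Int) : Nat :=
  if h : d ≠ 1 ∧ 1 < e - s then
    nodeW s (s + PySem.Int.floordiv (e - s) 2) (d - 1) +
    nodeW (s + PySem.Int.floordiv (e - s) 2) e (d - 1) + 1
  else 1
termination_by (e - s).toNat
decreasing_by
  all_goals
    rw [PySem.Int.floordiv_eq_ediv_of_pos (by omega : (0:Int) < 2)]
    omega

def stackW (st : List (Int × Int × Int)) : Nat :=
  (st.map (fun x => nodeW x.1 x.2.1 x.2.2)).sum

theorem nodeW_pos (s e d : Int) : 1 ≤ nodeW s e d := by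
  rw [nodeW]; split <;> omega

theorem nodeW_expand {s e d : Int} (h : d ≠ 1 ∧ 1 < e - s) :
    nodeW s e d = nodeW s (s + PySem.Int.floordiv (e - s) 2) (d - 1) +
      nodeW (s + PySem.Int.floordiv (e - s) 2) e (d - 1) + 1 := by
  rw [nodeW, dif_pos h]

theorem nodeW_le : ∀ (s e d : Int),
    nodeW s e d ≤ 2 * (e - s).toNat + 1 ∧ (1 ≤ e - s → nodeW s e d ≤ 2 * (e - s).toNat - 1) := by
  intro s e d
  induction s, e, d using nodeW.induct with
  | case1 s e d h ih1 ih2 =>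
    have hfd : PySem.Int.floordiv (e - s) 2 = (e - s) / 2 :=
      PySem.Int.floordiv_eq_ediv_of_pos (by omega)
    rw [nodeW_expand h, hfd]
    rw [hfd] at ih1 ih2
    have h1 := ih1.2 (by omega)
    have h2 := ih2.2 (by omega)
    have h1' := ih1.1
    have h2' := ih2.1
    constructor <;> intros <;> omega
  | case2 s e d h =>
    rw [nodeW, dif_neg h]
    constructor <;> intros <;> omega

theorem fold_phase1_good (t : List Char) :
    ∀ (fuel : Nat) (st : List (Int × Int × Int)) (D0 : PySem.Dict (Int × Int × Int) (List Char)),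
      stackW st ≤ fuel → GoodD t D0 →
      GoodD t ((phase1go fuel st).reverse.foldl (stepB t) D0) ∧
      ∀ k ∈ st, ((phase1go fuel st).reverse.foldl (stepB t) D0).get? k
          = some (gfun t k.1 k.2.1 k.2.2) := by
  intro fuel
  induction fuel with
  | zero =>
    intro st D0 hf hG
    match st with
    | [] => exact ⟨by simpa [phase1go] using hG, by simp⟩
    | x :: rest =>
      exfalso
      have := nodeW_pos x.1 x.2.1 x.2.2
      simp only [stackW, List.map_cons, List.sum_cons] at hf
      omega
  | succ fuel ih =>
    intro st D0 hf hG
    match st with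
    | [] => exact ⟨by simpa [phase1go] using hG, by simp⟩
    | (s, e, d) :: rest =>
      by_cases h : d ≠ 1 ∧ 1 < e - s
      · have hstep : phase1go (fuel+1) ((s, e, d) :: rest) =
            (s, e, d) ::
              phase1go fuel ((s + PySem.Int.floordiv (e - s) 2, e, d - 1) ::
                      (s, s + PySem.Int.floordiv (e - s) 2, d - 1) :: rest) := by
          rw [phase1go, if_pos h]
        have hf' : stackW ((s + PySem.Int.floordiv (e - s) 2, e, d - 1) ::
                      (s, s + PySem.Int.floordiv (e - s) 2, d - 1) :: rest) ≤ fuel := by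
          simp only [stackW, List.map_cons, List.sum_cons] at hf ⊢
          rw [nodeW_expand h] at hf
          omega
        obtain ⟨G1, P1⟩ := ih _ D0 hf' hG
        rw [hstep]
        simp only [List.reverse_cons, List.foldl_append, List.foldl_cons, List.foldl_nil]
        set D1 := (phase1go fuel ((s + PySem.Int.floordiv (e - s) 2, e, d - 1) ::
                      (s, s + PySem.Int.floordiv (e - s) 2, d - 1) :: rest)).reverse.foldl (stepB t) D0 with hD1
        have hc1 : D1.get? (s, s + PySem.Int.floordiv (e - s) 2, d - 1)
            = some (gfun t s (s + PySem.Int.floordiv (e - s) 2) (d - 1)) := P1 _ (by simp)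
        have hc2 : D1.get? (s + PySem.Int.floordiv (e - s) 2, e, d - 1)
            = some (gfun t (s + PySem.Int.floordiv (e - s) 2) e (d - 1)) := P1 _ (by simp)
        have hng : ¬((s, e, d).2.2 = 1 ∨ (s, e, d).2.1 - (s, e, d).1 ≤ 1) := by
          simp only []; omega
        have hstepB : stepB t D1 (s, e, d) = D1.insert (s, e, d) (gfun t s e d) := by
          rw [stepB]
          simp only [if_neg hng, hc1, hc2, Option.getD_some]
          congr 1
          conv_rhs => rw [gfun, dif_pos h]
        rw [hstepB]
        constructor
        · intro k v hk
          rw [PySem.Dict.get?_insert] at hk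
          split at hk
          · next heq => subst heq; cases hk; rfl
          · exact G1 k v hk
        · intro k hk
          rw [PySem.Dict.get?_insert]
          split
          · next heq => subst heq; rfl
          · rcases List.mem_cons.mp hk with rfl | hmem
            · simp at *
            · exact P1 k (by simp [hmem])
      · have hstep : phase1go (fuel+1) ((s, e, d) :: rest) = (s, e, d) :: phase1go fuel rest := by
          rw [phase1go, if_neg h]
        have hf' : stackW rest ≤ fuel := by
          have := nodeW_pos s e d
          simp only [stackW, List.map_cons, List.sum_cons] at hf
          simp only [stackW]
          omega
        obtain ⟨G1, P1⟩ := ih rest D0 hf' hG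
        rw [hstep]
        simp only [List.reverse_cons, List.foldl_append, List.foldl_cons, List.foldl_nil]
        set D1 := (phase1go fuel rest).reverse.foldl (stepB t) D0 with hD1
        have hyes : ((s, e, d).2.2 = 1 ∨ (s, e, d).2.1 - (s, e, d).1 ≤ 1) := by
          simp only []; omega
        have hstepB : stepB t D1 (s, e, d) = D1.insert (s, e, d) (gfun t s e d) := by
          rw [stepB]
          simp only [if_pos hyes]
          congr 1
          rw [gfun, dif_neg h]
        rw [hstepB]
        constructor
        · intro k v hk
          rw [PySem.Dict.get?_insert] at hk
          split at hk
          · next heq => subst heq; cases hk; rfl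
          · exact G1 k v hk
        · intro k hk
          rw [PySem.Dict.get?_insert]
          split
          · next heq => subst heq; rfl
          · rcases List.mem_cons.mp hk with rfl | hmem
            · simp at *
            · exact P1 k hmem

theorem sortA_short : ∀ (k : Nat) (t : List Char), t.length ≤ 1 → sortA t (k+1) = t := by
  intro k
  induction k with
  | zero => intro t _; rfl
  | succ k ih =>
    intro t ht
    match t, ht with
    | [], _ =>
      show sortA [] (k+2) = []
      simp [sortA, PySem.List.slice, ih [] (by simp)]
    | [c], _ =>
      show sortA [c] (k+2) = [c]
      have h2 : PySem.Int.floordiv ((1:Nat):Int) 2 = 0 := by decide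
      simp only [sortA, List.length_cons, List.length_nil, Nat.zero_add, h2]
      simp [ih [] (by simp), ih [c] (by simp), PySem.List.slice]

theorem sortA_eq_g : ∀ (fuel : Nat) (t : List Char) (s e : Int),
    0 ≤ s → s ≤ e → e ≤ (t.length : Int) →
    sortA (PySem.List.slice t (some s) (some e)) (fuel+1) = gfun t s e ((fuel : Int) + 1) := by
  intro fuel
  induction fuel with
  | zero =>
    intro t s e h0 hse he
    rw [gfun, dif_neg (by push Not; intro hc; omega)]
    simp [sortA]
  | succ k ih =>
    intro t s e h0 hse he
    set u := PySem.List.slice t (some s) (some e) with hu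
    have hlen : u.length = (e - s).toNat := by
      rw [hu, PySem.List.slice_toNat t h0 (by omega)]
      simp
      omega
    by_cases hbig : 1 < e - s
    · -- split case
      have hd : ((k:Int) + 1 + 1 ≠ 1 ∧ 1 < e - s) := ⟨by omega, hbig⟩
      -- the midpoint
      have hfd : PySem.Int.floordiv ((u.length : Int)) 2 = PySem.Int.floordiv (e - s) 2 := by
        rw [hlen]; congr 1; omega
      have hfd2 : PySem.Int.floordiv (e - s) 2 = (e - s) / 2 :=
        PySem.Int.floordiv_eq_ediv_of_pos (by omega)
      set h2 : Int := PySem.Int.floordiv (e - s) 2 with hh2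
      have hh2pos : 1 ≤ h2 := by rw [hfd2]; omega
      have hh2lt : h2 < e - s := by rw [hfd2]; omega
      have hslice1 : PySem.List.slice u none (some h2) = PySem.List.slice t (some s) (some (s + h2)) := by
        rw [PySem.List.slice_to u (by omega), hu,
            PySem.List.slice_toNat t h0 (by omega), PySem.List.slice_toNat t h0 (by omega),
            List.take_take]
        congr 1
        omega
      have hslice2 : PySem.List.slice u (some h2) none = PySem.List.slice t (some (s + h2)) (some e) := by
        rw [PySem.List.slice_from u (by omega), hu,
            PySem.List.slice_toNat t h0 (by omega), PySem.List.slice_toNat t (by omega) (by omega),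
            List.drop_take, List.drop_drop]
        congr 1
        · omega
        · congr 1; omega
      show (let l : Int := (u.length : Int);
            let t1 := sortA (PySem.List.slice u none (some (PySem.Int.floordiv l 2))) (k+1)
            let t2 := sortA (PySem.List.slice u (some (PySem.Int.floordiv l 2)) none) (k+1)
            if t1 < t2 then t1 ++ t2 else t2 ++ t1) = _
      simp only [hfd]
      rw [hslice1, hslice2, ih t s (s + h2) h0 (by omega) (by omega),
          ih t (s + h2) e (by omega) (by omega) he]
      have hc : ((k+1:Nat):Int) + 1 ≠ 1 ∧ 1 < e - s := ⟨by push_cast; omega, hbig⟩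
      conv_rhs => rw [gfun]
      rw [dif_pos hc]
      have harg : ((k+1:Nat):Int) + 1 - 1 = (k:Int) + 1 := by push_cast; omega
      simp only [← hh2, harg]
    · -- short segment
      have : u.length ≤ 1 := by omega
      rw [sortA_short _ u this, gfun, dif_neg (by push Not; intro hc; omega), hu]

-- ===== VERDICT (by name: the statement is the Claim_ definition above) =====
theorem sort_solution_spec : Claim_equal_sort_solution := by
  intro t n _hdom hpre
  obtain ⟨hn1, _⟩ := hpre
  show sort_solution t n = sort_solution_alt t n
  unfold sort_solution sort_solution_alt
  simp only []
  obtain ⟨_, P⟩ := fold_phase1_good t.toList (2 * t.toList.length + 1)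
      [(0, ((t.toList.length : Int)), n)] PySem.Dict.empty
      (by
        simp only [stackW, List.map_cons, List.map_nil, List.sum_cons, List.sum_nil]
        have hb := (nodeW_le 0 ((t.toList.length : Int)) n).1
        omega)
      (by intro k v h; simp [PySem.Dict.empty, PySem.Dict.get?] at h)
  have hroot := P (0, ((t.toList.length : Int)), n) (by simp)
  rw [hroot, Option.getD_some]
  have hid : PySem.List.slice t.toList (some 0) (some ((t.toList.length : Int))) = t.toList := by
    rw [PySem.List.slice_toNat t.toList le_rfl (by omega)]
    simp
  have hnt : n.toNat = (n - 1).toNat + 1 := by omega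
  have hA : sortA t.toList n.toNat
      = gfun t.toList 0 ((t.toList.length : Int)) n := by
    have hg := sortA_eq_g ((n-1).toNat) t.toList 0 ((t.toList.length : Int)) le_rfl (by omega) le_rfl
    rw [hid] at hg
    rw [hnt, hg]
    congr 1
    omega
  rw [hA]
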